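-- pv_equiv track=rewrite | github.com/joelcede/Algorithms_Python | devsuCodeJam/devsu2021/preliminary/question2.py | mewms
-- ===== SOURCE A (Python) =====
-- def mewms(number: list) -> int:
--     li1, li2 = [], []
--     setLi = list(set(number))
--     for i in setLi:
--         count = number.count(i)
--         for _ in range(count): number.remove(i)
--         li1.append(sum(number))
--         for _ in range(count): number.insert(0,i)
--         w = min(li1)
--     for n in range(len(li1)):
--         if li1[n] == w:
--             li2.append(n)
--     return setLi[max(li2)]
-- ===== SOURCE B (Python) =====
-- # Single-pass re-implementation: one counting dict + one min-scan, no list mutation.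
-- # (A additionally reorders the caller's list in place; B does not touch it --
-- #  the equivalence proved is about the return value.)
-- def mewms(number: list) -> int:
--     total = sum(number)
--     counts = {}
--     for x in number:
--         counts[x] = counts.get(x, 0) + 1
--     best = None
--     for v in counts:
--         cand = total - v * counts[v]
--         if best is None or cand <= best[0]:
--             best = (cand, v)
--     return best[1]
-- ===== Notes on version B (the rewrite author's own statement) =====
-- stated objective: faster
-- what changed: Replaces A's quadratic remove-all/sum/reinsert pass per distinct value plus two index scans by one counting dict and a single online min-scan (candidate = total - v*count[v]), with no mutation of the input list.
-- outside the precondition, e.g. on mewms([-65535, -3, -1000000, -2147483648, 8, 0, 10, 5, 0, 5, 3, -1, -32]): A returns 10, B returns 5; on mewms([1, 1, 2]): A returns 2, B returns 2; on mewms([]): A raises ValueError, B raises TypeError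
import Mathlib
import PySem

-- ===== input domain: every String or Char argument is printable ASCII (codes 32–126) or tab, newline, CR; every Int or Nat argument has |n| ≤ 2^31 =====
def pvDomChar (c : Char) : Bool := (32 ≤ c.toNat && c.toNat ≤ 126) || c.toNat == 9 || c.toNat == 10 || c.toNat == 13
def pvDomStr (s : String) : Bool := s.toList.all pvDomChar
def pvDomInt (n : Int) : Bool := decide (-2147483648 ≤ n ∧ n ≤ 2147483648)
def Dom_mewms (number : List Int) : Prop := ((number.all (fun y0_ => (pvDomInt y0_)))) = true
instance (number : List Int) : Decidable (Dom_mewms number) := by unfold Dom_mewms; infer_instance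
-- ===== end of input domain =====

-- B replaces A's per-distinct-value remove-all/sum/reinsert scans by one counting dict and a
-- single online min-scan.  NOTE: A reorders the caller's list in place (B does not); the
-- equivalence proved here is about the return value only.

-- ===== PORT A =====
-- one iteration of A's 'for i in setLi' loop over the state (number, li1)
def mewmsStep (st : List Int × List Int) (i : Int) : List Int × List Int :=
  let count := PySem.List.count st.1 i
  -- for _ in range(count): number.remove(i)   (i is always present here, so remove? never misses)
  let num1 := (List.range count).foldl (fun l _ => (PySem.List.remove? l i).getD l) st.1
  let li1 := st.2 ++ [num1.sum]
  -- for _ in range(count): number.insert(0, i)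
  let num2 := (List.range count).foldl (fun l _ => PySem.List.insert l 0 i) num1
  (num2, li1)

def mewms (number : List Int) : Int :=
  let setLi : List Int := PySem.Set.ofList number
  let st := setLi.foldl mewmsStep (number, [])
  let li1 := st.2
  -- 'w = min(li1)' is recomputed each loop iteration; its final value is min of the full li1
  let w := (PySem.List.min? li1 (fun x => x)).getD 0
  let li2 := (List.range li1.length).foldl
    (fun acc (n : Nat) => if PySem.List.pyGetD li1 (n : Int) 0 = w then acc ++ [(n : Int)] else acc)
    ([] : List Int)
  PySem.List.pyGetD setLi ((PySem.List.max? li2 (fun x => x)).getD 0) 0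

-- ===== PORT B =====
-- body of Source B's 'for v in counts' loop ('counts[v]' never misses, so getD is exact)
def mewmsAltStep (total : Int) (counts : PySem.Dict Int Int)
    (best : Option (Int × Int)) (v : Int) : Option (Int × Int) :=
  let cand := total - v * counts.getD v 0
  match best with
  | none => some (cand, v)
  | some b => if cand ≤ b.1 then some (cand, v) else some b

def mewms_alt (number : List Int) : Int :=
  let total := number.sum
  let counts := number.foldl (fun d x => d.insert x (d.getD x 0 + 1))
                  (PySem.Dict.empty : PySem.Dict Int Int)
  let best := (PySem.Dict.keys counts).foldl (mewmsAltStep total counts) none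
  (best.getD (0, 0)).2

-- ===== PRECONDITION & SPEC =====
-- Pre_ excludes the empty list, on which A raises ValueError (max of an empty li2), and lists in
-- which two distinct values have the same removed total v*count(v): there A's tie-break depends
-- on Python's accidental set-iteration order (both programs' answers are equally defensible).
def Pre_mewms (number : List Int) : Prop :=
  number ≠ [] ∧
  (PySem.Set.ofList number).Pairwise
    (fun a b => a * (List.count a number : Int) ≠ b * (List.count b number : Int))
instance (number : List Int) : Decidable (Pre_mewms number) := by unfold Pre_mewms; infer_instance

def pvWitness_mewms : List Int := [3, 1, 1, 2, 2]

def Spec_mewms (number : List Int) (out : Int) : Prop := out = mewms_alt number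
instance (number : List Int) (out : Int) : Decidable (Spec_mewms number out) := by unfold Spec_mewms; infer_instance

-- ===== CLAIM (what is proved, stated in full; the proofs are below) =====
def Claim_equal_mewms : Prop :=
  ∀ (number : List Int), Dom_mewms number → Pre_mewms number → Spec_mewms number (mewms number)

-- ===== LEMMAS AND PROOFS =====

-- the value both programs compute for a candidate v: sum(number) - v*number.count(v)
def fval (number : List Int) (v : Int) : Int := number.sum - v * (List.count v number : Int)

-- B's loop body, abstracted over the score function
def bstep (f : Int → Int) (best : Option (Int × Int)) (v : Int) : Option (Int × Int) :=
  match best with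
  | none => some (f v, v)
  | some b => if f v ≤ b.1 then some (f v, v) else some b

lemma mewmsAltStep_eq_bstep (number : List Int) :
    mewmsAltStep number.sum (PySem.Dict.counter number) = bstep (fval number) := by
  funext best v
  cases best <;> simp [mewmsAltStep, bstep, fval, PySem.Dict.getD_counter]

-- a fold over range that ignores the index is a function iterate
lemma foldl_range_const {α : Type} (g : α → α) (k : Nat) (a : α) :
    (List.range k).foldl (fun l _ => g l) a = g^[k] a := by
  induction k with
  | zero => simp
  | succ k ih => rw [List.range_succ, List.foldl_append, ih, Function.iterate_succ_apply']; rfl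

-- k iterated removes of i take out k copies of i (as a permutation statement)
lemma iterRemove_perm (i : Int) :
    ∀ (k : Nat) (l : List Int), k ≤ List.count i l →
      l.Perm ((fun l => (PySem.List.remove? l i).getD l)^[k] l ++ List.replicate k i) := by
  intro k
  induction k with
  | zero => intro l _; simp
  | succ k ih =>
    intro l hk
    have hi : i ∈ l := List.count_pos_iff.mp (lt_of_lt_of_le (Nat.succ_pos k) hk)
    rw [Function.iterate_succ_apply]
    have hg : (PySem.List.remove? l i).getD l = l.erase i := by
      rw [PySem.List.remove?_eq_some_erase l i hi]; rfl
    rw [hg, List.replicate_succ]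
    have hcnt : k ≤ List.count i (l.erase i) := by
      rw [List.count_erase_self]; omega
    have p1 : l.Perm (i :: l.erase i) := List.perm_cons_erase hi
    have p2 := (ih (l.erase i) hcnt).cons i
    exact p1.trans (p2.trans List.perm_middle.symm)

-- k iterated inserts at position 0 prepend k copies
lemma iterInsert (i : Int) (k : Nat) (r : List Int) :
    (fun l => PySem.List.insert l 0 i)^[k] r = List.replicate k i ++ r := by
  induction k generalizing r with
  | zero => simp
  | succ k ih =>
    rw [Function.iterate_succ_apply, PySem.List.insert_zero, ih, List.replicate_succ']
    simp

lemma mewmsStep_spec (number num acc : List Int) (v : Int) (hp : num.Perm number) :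
    (mewmsStep (num, acc) v).2 = acc ++ [fval number v] ∧
    (mewmsStep (num, acc) v).1.Perm number := by
  have hkc : PySem.List.count num v = List.count v num := PySem.List.count_eq num v
  have hperm : num.Perm ((fun l => (PySem.List.remove? l v).getD l)^[List.count v num] num
      ++ List.replicate (List.count v num) v) :=
    iterRemove_perm v (List.count v num) num (le_refl _)
  have hsum : ((fun l => (PySem.List.remove? l v).getD l)^[List.count v num] num).sum
      = fval number v := by
    have h1 := hperm.sum_eq
    rw [List.sum_append, List.sum_replicate] at h1
    have h2 : num.sum = number.sum := hp.sum_eq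
    have h3 : List.count v num = List.count v number := hp.count_eq v
    have hns : ((List.count v num) • v : Int) = ((List.count v num : Int)) * v :=
      nsmul_eq_mul _ v
    unfold fval
    rw [← h3]
    have hmc : v * ((List.count v num : Int)) = ((List.count v num : Int)) * v := mul_comm _ _
    rw [hns] at h1
    linarith
  have hstep : mewmsStep (num, acc) v =
      (List.replicate (List.count v num) v
        ++ (fun l => (PySem.List.remove? l v).getD l)^[List.count v num] num,
       acc ++ [((fun l => (PySem.List.remove? l v).getD l)^[List.count v num] num).sum]) := by
    simp only [mewmsStep, hkc, foldl_range_const, iterInsert]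
  rw [hstep]
  refine ⟨by simp [hsum], ?_⟩
  exact (List.perm_append_comm.trans hperm.symm).trans hp

-- invariant of A's main loop: li1 collects fval for each processed value; number stays a permutation
lemma mewmsFold_spec (number : List Int) :
    ∀ (S num acc : List Int), num.Perm number →
      (S.foldl mewmsStep (num, acc)).2 = acc ++ S.map (fval number) ∧
      (S.foldl mewmsStep (num, acc)).1.Perm number := by
  intro S
  induction S with
  | nil => intro num acc hp; simpa using hp
  | cons v S ih =>
    intro num acc hp
    obtain ⟨h2, h1⟩ := mewmsStep_spec number num acc v hp
    have hpair : mewmsStep (num, acc) v = ((mewmsStep (num, acc) v).1, acc ++ [fval number v]) := by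
      rw [← h2]
    rw [List.foldl_cons, hpair]
    obtain ⟨ih2, ih1⟩ := ih (mewmsStep (num, acc) v).1 (acc ++ [fval number v]) h1
    exact ⟨by rw [ih2]; simp, ih1⟩

-- B's fold returns the strict minimizer of f when all f-values over S are distinct
lemma bfold_spec (f : Int → Int) :
    ∀ (S : List Int), S ≠ [] → S.Pairwise (fun a b => f a ≠ f b) →
      ∃ v, v ∈ S ∧ S.foldl (bstep f) none = some (f v, v) ∧ ∀ u ∈ S, u ≠ v → f v < f u := by
  intro S
  induction S using List.reverseRecOn with
  | nil => intro h; exact absurd rfl h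
  | append_singleton S x ih =>
    intro _ hpw
    rw [List.foldl_append]
    by_cases hS : S = []
    · subst hS
      refine ⟨x, by simp, by simp [bstep], ?_⟩
      intro u hu hne
      simp at hu
      exact absurd hu hne
    · have hpwS : S.Pairwise (fun a b => f a ≠ f b) := (List.pairwise_append.mp hpw).1
      have hSx : ∀ a ∈ S, f a ≠ f x := fun a ha =>
        (List.pairwise_append.mp hpw).2.2 a ha x (by simp)
      obtain ⟨v, hvS, hfold, hmin⟩ := ih hS hpwS
      rw [hfold]
      by_cases hle : f x ≤ f v
      · refine ⟨x, by simp, by simp [bstep, hle], ?_⟩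
        intro u hu hne
        rcases List.mem_append.mp hu with hu | hu
        · by_cases huv : u = v
          · subst huv; exact lt_of_le_of_ne hle (hSx u hu).symm
          · exact lt_of_le_of_lt hle (hmin u hu huv)
        · simp at hu; exact absurd hu hne
      · refine ⟨v, by simp [hvS], by simp [bstep, hle], ?_⟩
        intro u hu hne
        rcases List.mem_append.mp hu with hu | hu
        · exact hmin u hu hne
        · simp at hu; subst hu; exact not_le.mp hle

-- an index-collecting fold with no hits returns the accumulator unchanged
lemma foldl_range_none (M : List Int) (w : Int) :
    ∀ (L : Nat) (acc : List Int), (∀ n, n < L → ¬ (PySem.List.pyGetD M (n : Int) 0 = w)) →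
      (List.range L).foldl
        (fun acc (n : Nat) =>
          if PySem.List.pyGetD M (n : Int) 0 = w then acc ++ [(n : Int)] else acc) acc = acc := by
  intro L
  induction L with
  | zero => intro acc _; simp
  | succ L ih =>
    intro acc h
    rw [List.range_succ, List.foldl_append, ih acc (fun n hn => h n (by omega))]
    simp only [List.foldl_cons, List.foldl_nil, if_neg (h L (by omega))]

-- an index-collecting fold whose predicate holds at exactly one index yields that index
lemma foldl_range_unique (M : List Int) (w : Int) :
    ∀ (L : Nat) (acc : List Int) (n0 : Nat), n0 < L →
      (∀ n, n < L → ((PySem.List.pyGetD M (n : Int) 0 = w) ↔ n = n0)) →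
      (List.range L).foldl
        (fun acc (n : Nat) =>
          if PySem.List.pyGetD M (n : Int) 0 = w then acc ++ [(n : Int)] else acc) acc
        = acc ++ [(n0 : Int)] := by
  intro L
  induction L with
  | zero => intro acc n0 h; omega
  | succ L ih =>
    intro acc n0 hn0 hu
    rw [List.range_succ, List.foldl_append]
    by_cases hcase : n0 = L
    · subst hcase
      rw [foldl_range_none M w n0 acc (fun n hn hp => by
        have := (hu n (by omega)).mp hp; omega)]
      simp only [List.foldl_cons, List.foldl_nil, if_pos ((hu n0 (by omega)).mpr rfl)]
    · have hn0L : n0 < L := by omega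
      rw [ih acc n0 hn0L (fun n hn => hu n (by omega))]
      have hnotL : ¬ (PySem.List.pyGetD M (L : Int) 0 = w) :=
        fun hp => hcase ((hu L (by omega)).mp hp).symm
      simp only [List.foldl_cons, List.foldl_nil, if_neg hnotL]

theorem mewms_spec : Claim_equal_mewms := by
  intro number _ hpre
  obtain ⟨hne, hpw0⟩ := hpre
  unfold Spec_mewms
  have hSnd : (PySem.Set.ofList number).Nodup := PySem.Set.nodup_ofList number
  have hSne : (PySem.Set.ofList number : List Int) ≠ [] := by
    cases number with
    | nil => exact absurd rfl hne
    | cons x t =>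
      exact List.ne_nil_of_mem ((PySem.Set.mem_ofList _ x).mpr (by simp))
  have hpw : (PySem.Set.ofList number).Pairwise
      (fun a b => fval number a ≠ fval number b) := by
    refine hpw0.imp ?_
    intro a b h heq
    apply h
    unfold fval at heq
    linarith
  obtain ⟨v, hvS, hbfold, hmin⟩ := bfold_spec (fval number) (PySem.Set.ofList number) hSne hpw
  have hB : mewms_alt number = v := by
    simp only [mewms_alt, PySem.Dict.foldl_insert_getD_add_one_eq_counter,
      PySem.Dict.keys_counter, mewmsAltStep_eq_bstep, hbfold]
    rfl
  rw [hB]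
  -- A's side
  obtain ⟨hli1, -⟩ :=
    mewmsFold_spec number (PySem.Set.ofList number) number [] (List.Perm.refl number)
  simp only [mewms, hli1, List.nil_append]
  -- the minimum of li1
  have hw : PySem.List.min? ((PySem.Set.ofList number).map (fval number)) (fun x => x)
      = some (fval number v) := by
    cases hmq : PySem.List.min? ((PySem.Set.ofList number).map (fval number)) (fun x => x) with
    | none =>
      rw [PySem.List.min?_eq_none_iff] at hmq
      exact absurd (List.map_eq_nil_iff.mp hmq) hSne
    | some m =>
      obtain ⟨u, huS, hum⟩ := List.mem_map.mp (PySem.List.min?_mem hmq)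
      have hle : m ≤ fval number v :=
        PySem.List.min?_isMin hmq (fval number v) (List.mem_map_of_mem hvS)
      by_cases huv : u = v
      · subst huv; rw [hum]
      · exact absurd (lt_of_lt_of_le (hmin u huS huv) (hum ▸ hle)) (lt_irrefl _)
  rw [hw]
  -- the unique index n0 of v in setLi
  have hn0lt : List.idxOf v (PySem.Set.ofList number) < (PySem.Set.ofList number).length :=
    List.idxOf_lt_length_of_mem hvS
  have hgetn0 : (PySem.Set.ofList number)[List.idxOf v (PySem.Set.ofList number)]'hn0lt = v :=
    List.getElem_idxOf hn0lt
  have hlen : ((PySem.Set.ofList number).map (fval number)).length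
      = (PySem.Set.ofList number).length := by simp
  have huniq : ∀ n, n < ((PySem.Set.ofList number).map (fval number)).length →
      ((PySem.List.pyGetD ((PySem.Set.ofList number).map (fval number)) (n : Int) 0
        = fval number v) ↔ n = List.idxOf v (PySem.Set.ofList number)) := by
    intro n hn
    have hn' : n < (PySem.Set.ofList number).length := by omega
    rw [PySem.List.pyGetD_natCast, List.getD_eq_getElem _ _ hn,
      List.getElem_map]
    constructor
    · intro hfe
      have hSn : (PySem.Set.ofList number)[n]'hn' = v := by
        by_contra hnev
        exact absurd hfe (ne_of_gt (hmin _ (List.getElem_mem hn') hnev))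
      have := (hSnd.getElem_inj_iff (hi := hn') (hj := hn0lt)).mp (by rw [hSn, hgetn0])
      exact this
    · intro hEq
      subst hEq
      rw [hgetn0]
  rw [foldl_range_unique ((PySem.Set.ofList number).map (fval number))
    ((some (fval number v)).getD 0)
    ((PySem.Set.ofList number).map (fval number)).length []
    (List.idxOf v (PySem.Set.ofList number)) (by omega) huniq]
  simp only [List.nil_append, PySem.List.max?_id_cons, List.foldl_nil, Option.getD_some]
  rw [PySem.List.pyGetD_natCast, List.getD_eq_getElem _ _ hn0lt, hgetn0]

-- ===== VERDICT =====
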